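-- pv_equiv track=rewrite | github.com/AnshMittal1811/MachineLearning-AI | 127_ConDor_Self_Supervised_Canonicalization_of_3D_Pose_for_Partial_Shapes/ConDor/SO3_CNN/tf_wigner.py | monomial_basis_2D_size
-- ===== SOURCE A (Python) =====
-- def monomial_basis_2D_size(d):
--     num = 0
--     for I in range((d + 1) ** 2):
--         i = I % (d + 1)
--         a = int((I - i) / (d + 1))
--         j = a % (d + 1)
--         if (i + j <= d):
--             num += 1
--     return num
-- ===== SOURCE B (Python) =====
-- def monomial_basis_2D_size(d):
--     return (d + 1) * (d + 2) // 2
-- ===== Notes on version B (the rewrite author's own statement) =====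
-- stated objective: faster
-- what changed: Replaces the O(d^2) scan over the (d+1)x(d+1) index grid by the closed-form triangular number (d+1)*(d+2)//2; Pre_ restricts to -2 <= d, the natural nonnegative-degree domain plus the two degrees just below zero where the formula still coincides with A; from -3 down A's count arises from Python's negative-divisor modulo arithmetic.
-- outside the precondition, e.g. on monomial_basis_2D_size(-3): A returns 0, B returns 1; on monomial_basis_2D_size(-4): A returns 1, B returns 3; on monomial_basis_2D_size(-6): A returns 6, B returns 10
import Mathlib
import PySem

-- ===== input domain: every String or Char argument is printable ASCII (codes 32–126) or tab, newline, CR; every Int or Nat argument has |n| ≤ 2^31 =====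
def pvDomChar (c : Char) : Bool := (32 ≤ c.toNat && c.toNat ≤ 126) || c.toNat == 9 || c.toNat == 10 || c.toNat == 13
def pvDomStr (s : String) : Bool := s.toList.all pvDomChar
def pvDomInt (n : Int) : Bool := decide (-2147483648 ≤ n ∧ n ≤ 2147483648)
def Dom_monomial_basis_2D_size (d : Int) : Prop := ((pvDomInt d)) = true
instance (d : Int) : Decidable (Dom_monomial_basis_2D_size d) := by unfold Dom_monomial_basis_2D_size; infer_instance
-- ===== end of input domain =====

-- B replaces A's O(d^2) scan over the (d+1)x(d+1) index grid by the closed-form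
-- triangular number (d+1)(d+2)//2 (objective: faster, asymptotic).


-- ===== PORT A =====
-- int((I - i) / (d + 1)) is ported as truncated integer division: (d+1) always divides
-- (I - i) exactly (i = I % (d+1)), so Python's float true division is exact there.
def monomial_basis_2D_size (d : Int) : Int :=
  (PySem.List.pyRange 0 ((d + 1) ^ 2) 1).foldl (fun num I =>
    let i := PySem.Int.mod I (d + 1)
    let a := PySem.Int.truncdiv (I - i) (d + 1)
    let j := PySem.Int.mod a (d + 1)
    if i + j ≤ d then num + 1 else num) 0

-- ===== PORT B =====
def monomial_basis_2D_size_alt (d : Int) : Int :=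
  PySem.Int.floordiv ((d + 1) * (d + 2)) 2

-- ===== PRECONDITION & SPEC =====
-- Pre_ restricts to -2 ≤ d: the function counts a monomial basis, whose natural domain is
-- nonnegative degree (the closed form still coincides with A on the two degrees just below
-- zero, which therefore stay inside); on the excluded degrees from -3 down, outside that
-- domain, A's count arises from Python's negative-divisor modulo arithmetic.
def Pre_monomial_basis_2D_size (d : Int) : Prop := -2 ≤ d
instance (d : Int) : Decidable (Pre_monomial_basis_2D_size d) := by unfold Pre_monomial_basis_2D_size; infer_instance
def pvWitness_monomial_basis_2D_size : Int := 3

def Spec_monomial_basis_2D_size (d : Int) (out : Int) : Prop := out = monomial_basis_2D_size_alt d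
instance (d : Int) (out : Int) : Decidable (Spec_monomial_basis_2D_size d out) := by unfold Spec_monomial_basis_2D_size; infer_instance

-- ===== CLAIM (what is proved, stated in full; the proofs are below) =====
def Claim_equal_monomial_basis_2D_size : Prop := ∀ (d : Int), Dom_monomial_basis_2D_size d → Pre_monomial_basis_2D_size d → Spec_monomial_basis_2D_size d (monomial_basis_2D_size d)

-- ===== LEMMAS AND PROOFS =====

-- counting r < t among r < N
theorem pv_count_lt (t N : Nat) :
    (List.range N).countP (fun r => decide (r < t)) = min t N := by
  induction N with
  | zero => simp
  | succ n ih =>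
    rw [List.range_succ, List.countP_append, ih]
    simp only [List.countP_cons, List.countP_nil]
    by_cases h : n < t <;> simp [h] <;> omega

-- row-by-row count over the first k rows of the N-by-N grid (stated over Int to keep
-- the quadratic algebra linear_combination-friendly)
theorem pv_count_rows (N : Nat) :
    ∀ k, k ≤ N →
      2 * (((List.range (N * k)).countP (fun m => decide (m % N + m / N % N + 1 ≤ N)) : Nat) : Int)
        = k * (2 * N + 1 - k) := by
  intro k
  induction k with
  | zero => simp
  | succ k ih =>
    intro hk
    have hkN : k < N := hk
    rw [Nat.mul_succ, List.range_add, List.countP_append, List.countP_map]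
    have hrow : (List.range N).countP
        ((fun m => decide (m % N + m / N % N + 1 ≤ N)) ∘ (fun r => N * k + r))
        = N - k := by
      rw [List.countP_congr (q := fun r => decide (r < N - k)) ?_, pv_count_lt]
      · omega
      · intro r hr
        have hrN : r < N := List.mem_range.mp hr
        simp only [Function.comp_apply]
        have h1 : (N * k + r) % N = r := by
          rw [Nat.add_comm, Nat.add_mul_mod_self_left, Nat.mod_eq_of_lt hrN]
        have h2 : (N * k + r) / N = k := by
          rw [Nat.add_comm, Nat.add_mul_div_left _ _ (by omega : 0 < N),
              Nat.div_eq_of_lt hrN]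
          omega
        rw [h1, h2, Nat.mod_eq_of_lt hkN]
        simp only [decide_eq_true_eq]
        omega
    rw [hrow]
    have ih' := ih (by omega)
    push_cast [Nat.cast_sub hkN.le]
    push_cast at ih'
    linear_combination ih'

-- the Int-side predicate of A's loop body, on a cast index, is the Nat-side predicate
theorem pv_pred_cast (N : Nat) (hN : 0 < N) (m : Nat) :
    (decide (PySem.Int.mod (↑m) (↑N) +
       PySem.Int.mod (PySem.Int.truncdiv ((↑m : Int) - PySem.Int.mod (↑m) (↑N)) (↑N)) (↑N)
       ≤ (↑N : Int) - 1))
    = decide (m % N + m / N % N + 1 ≤ N) := by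
  have hmod : PySem.Int.mod (↑m : Int) (↑N) = ((m % N : Nat) : Int) :=
    PySem.Int.mod_natCast m N
  have hsub : (↑m : Int) - ((m % N : Nat) : Int) = ((m - m % N : Nat) : Int) := by
    have := Nat.mod_le m N
    omega
  have hdiv : PySem.Int.truncdiv (((m - m % N : Nat) : Int)) (↑N) = ((m / N : Nat) : Int) := by
    have hq : m - m % N = N * (m / N) := by
      have := Nat.div_add_mod m N; omega
    simp only [PySem.Int.truncdiv, hq]
    rw [show ((N * (m / N) : Nat) : Int) = (↑N : Int) * ↑(m / N) by push_cast; ring]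
    rw [Int.mul_tdiv_cancel_left _ (by exact_mod_cast hN.ne')]
  rw [hmod, hsub, hdiv, PySem.Int.mod_natCast]
  apply decide_eq_decide.mpr
  omega

-- A's loop on a nonnegative degree computes the triangular number
theorem pv_main (m0 : Nat) :
    monomial_basis_2D_size (↑m0) = monomial_basis_2D_size_alt (↑m0) := by
  have hcast : ((↑m0 : Int) + 1) ^ 2 = (((m0 + 1) * (m0 + 1) : Nat) : Int) := by push_cast; ring
  unfold monomial_basis_2D_size monomial_basis_2D_size_alt
  rw [hcast, PySem.List.pyRange_zero_natCast]
  rw [PySem.List.foldl_ite_add_one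
    (p := fun I => PySem.Int.mod I (↑m0 + 1) +
      PySem.Int.mod (PySem.Int.truncdiv (I - PySem.Int.mod I (↑m0 + 1)) (↑m0 + 1)) (↑m0 + 1) ≤ ↑m0)]
  rw [List.countP_map]
  rw [List.countP_congr
      (q := fun m => decide (m % (m0 + 1) + m / (m0 + 1) % (m0 + 1) + 1 ≤ m0 + 1)) ?_]
  · have hcount := pv_count_rows (m0 + 1) (m0 + 1) (le_refl _)
    have hC : 2 * ((List.range ((m0 + 1) * (m0 + 1))).countP
        (fun m => decide (m % (m0 + 1) + m / (m0 + 1) % (m0 + 1) + 1 ≤ m0 + 1)))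
        = (m0 + 1) * (m0 + 2) := by
      have h2 : ((m0 + 1 : Nat) : Int) * (2 * ((m0 + 1 : Nat) : Int) + 1 - ((m0 + 1 : Nat) : Int))
          = (((m0 + 1) * (m0 + 2) : Nat) : Int) := by push_cast; ring
      rw [h2] at hcount
      exact_mod_cast hcount
    have hfd : PySem.Int.floordiv ((↑m0 + 1) * (↑m0 + 2)) 2
        = ((((m0 + 1) * (m0 + 2)) / 2 : Nat) : Int) := by
      rw [show ((↑m0 : Int) + 1) * (↑m0 + 2) = (((m0 + 1) * (m0 + 2) : Nat) : Int) by push_cast; ring]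
      exact_mod_cast PySem.Int.floordiv_natCast ((m0 + 1) * (m0 + 2)) 2
    rw [hfd]
    have hc : (List.range ((m0 + 1) * (m0 + 1))).countP
        (fun m => decide (m % (m0 + 1) + m / (m0 + 1) % (m0 + 1) + 1 ≤ m0 + 1))
        = (m0 + 1) * (m0 + 2) / 2 := by omega
    rw [hc]
    simp
  · intro k _
    simp only [Function.comp_apply]
    have h := pv_pred_cast (m0 + 1) (by omega) k
    rw [show ((m0 + 1 : Nat) : Int) = (↑m0 : Int) + 1 by push_cast; ring] at h
    rw [show ((↑m0 : Int) + 1) - 1 = ↑m0 by ring] at h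
    rw [h]

-- ===== VERDICT (by name: the statement is the Claim_ definition above) =====
theorem monomial_basis_2D_size_spec : Claim_equal_monomial_basis_2D_size := by
  intro d _ hpre
  unfold Spec_monomial_basis_2D_size
  by_cases h0 : 0 ≤ d
  · obtain ⟨m0, rfl⟩ := Int.eq_ofNat_of_zero_le h0
    exact pv_main m0
  · have hc : d = -1 ∨ d = -2 := by unfold Pre_monomial_basis_2D_size at hpre; omega
    rcases hc with rfl | rfl <;> decide
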